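-- pv_equiv track=rewrite | github.com/coastscout/CryptoFinal | Vigenere cipher.py | shiftedArrays
-- ===== SOURCE A (Python) =====
-- def shiftedArrays(arraytoshift):
--     allshiftedarrays = []
--     min = 9
--     max = 17
--
--     for i in range(min, max):
--         shiftedarray = [0] * len(arraytoshift)
--         for j in range(len(arraytoshift)):
--             if j >= i:
--                 shiftedarray[j] = arraytoshift[j - i]
--         allshiftedarrays.append(shiftedarray)
--     return allshiftedarrays
-- ===== SOURCE B (Python) =====
-- def shiftedArrays(arraytoshift):
--     n = len(arraytoshift)
--     prev = ([0] * 9 + list(arraytoshift))[:n]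
--     out = [prev]
--     for _ in range(7):
--         prev = ([0] + prev)[:n]
--         out.append(prev)
--     return out
-- ===== Notes on version B (the rewrite author's own statement) =====
-- stated objective: alternative
-- what changed: Instead of recomputing each of the 8 shifted arrays from the source with a nested per-index loop, B computes the shift-9 array once by padding-and-truncating and derives each subsequent array incrementally from the previous one by prepending a zero and truncating (whole-list slice operations replace the per-element inner loop).
import Mathlib
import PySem

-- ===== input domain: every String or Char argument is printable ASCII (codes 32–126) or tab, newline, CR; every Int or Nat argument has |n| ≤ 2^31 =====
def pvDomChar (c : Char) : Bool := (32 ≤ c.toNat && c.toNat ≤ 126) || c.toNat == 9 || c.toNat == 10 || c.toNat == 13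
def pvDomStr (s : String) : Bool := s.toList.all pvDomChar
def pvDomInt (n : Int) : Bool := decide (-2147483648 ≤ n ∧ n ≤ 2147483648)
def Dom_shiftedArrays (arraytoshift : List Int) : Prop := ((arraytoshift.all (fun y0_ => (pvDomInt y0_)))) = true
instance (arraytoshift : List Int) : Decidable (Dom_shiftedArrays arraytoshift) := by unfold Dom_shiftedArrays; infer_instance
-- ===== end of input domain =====

-- B derives each shifted array incrementally from the previous one (prepend a zero,
-- truncate) instead of A's nested index loop per shift; alternative decomposition, same cost.

-- ===== PORT A =====
def shiftedArrays (arraytoshift : List Int) : List (List Int) :=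
  (PySem.List.pyRange 9 17 1).foldl (fun alls i =>
    alls ++ [ (PySem.List.pyRange 0 (arraytoshift.length : Int) 1).foldl
        (fun arr j =>
          if j ≥ i then arr.set j.toNat (PySem.List.pyGetD arraytoshift (j - i) 0) else arr)
        (List.replicate arraytoshift.length (0 : Int)) ]) []

-- ===== PORT B =====
def shiftedArrays_alt (arraytoshift : List Int) : List (List Int) :=
  let n := arraytoshift.length
  let first := (List.replicate 9 (0 : Int) ++ arraytoshift).take n
  let p := (List.range 7).foldl
      (fun (p : List (List Int) × List Int) _ =>
        let nxt := ((0 : Int) :: p.2).take n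
        (p.1 ++ [nxt], nxt))
      ([first], first)
  p.1

-- ===== PRECONDITION & SPEC =====
def Spec_shiftedArrays (arraytoshift : List Int) (out : List (List Int)) : Prop := out = shiftedArrays_alt arraytoshift
instance (arraytoshift : List Int) (out : List (List Int)) : Decidable (Spec_shiftedArrays arraytoshift out) := by unfold Spec_shiftedArrays; infer_instance

-- ===== CLAIM (what is proved, stated in full; the proofs are below) =====
def Claim_equal_shiftedArrays : Prop := ∀ (arraytoshift : List Int), Dom_shiftedArrays arraytoshift → Spec_shiftedArrays arraytoshift (shiftedArrays arraytoshift)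

-- ===== LEMMAS AND PROOFS =====

-- the common description of a shifted copy: i leading zeros, then the source, truncated to n
def pvShift (a : List Int) (i : Nat) : List Int :=
  (List.replicate i (0 : Int) ++ a).take a.length

-- A's inner loop, folded over List.range m, fills the first m positions
theorem pvA_inner_gen (a : List Int) (i : Int) (hi : 0 ≤ i) (m : Nat) (hm : m ≤ a.length) :
    (List.range m).foldl
      (fun arr (k : Nat) =>
        if (k : Int) ≥ i then arr.set (k : Int).toNat (PySem.List.pyGetD a ((k : Int) - i) 0) else arr)
      (List.replicate a.length (0 : Int))
    = (List.replicate i.toNat (0 : Int) ++ a).take m ++ List.replicate (a.length - m) (0 : Int) := by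
  induction m with
  | zero => simp
  | succ m ih =>
    have hm' : m ≤ a.length := by omega
    have hmlt : m < a.length := by omega
    rw [List.range_succ, List.foldl_append, ih hm']
    simp only [List.foldl_cons, List.foldl_nil]
    have hlen : ((List.replicate i.toNat (0 : Int) ++ a).take m).length = m := by
      simp; omega
    by_cases hcase : (m : Int) ≥ i
    · have him : i.toNat ≤ m := by omega
      rw [if_pos hcase]
      have hrep : List.replicate (a.length - m) (0 : Int)
          = (0 : Int) :: List.replicate (a.length - (m + 1)) (0 : Int) := by
        have : a.length - m = (a.length - (m + 1)) + 1 := by omega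
        rw [this, List.replicate_succ]
      have hidx : ((m : Int)).toNat = m := by omega
      rw [hrep, hidx]
      have hset : (((List.replicate i.toNat (0 : Int) ++ a).take m)
            ++ (0 : Int) :: List.replicate (a.length - (m + 1)) (0 : Int)).set m
              (PySem.List.pyGetD a ((m : Int) - i) 0)
          = ((List.replicate i.toNat (0 : Int) ++ a).take m)
            ++ (PySem.List.pyGetD a ((m : Int) - i) 0) :: List.replicate (a.length - (m + 1)) (0 : Int) := by
        rw [List.set_append_right _ _ (by omega)]
        simp [hlen]
      rw [hset]
      have hgd : PySem.List.pyGetD a ((m : Int) - i) 0 = a.getD (m - i.toNat) 0 := by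
        have : (m : Int) - i = ((m - i.toNat : Nat) : Int) := by omega
        rw [this, PySem.List.pyGetD_natCast]
      have hmi : m - i.toNat < a.length := by omega
      have htake : (List.replicate i.toNat (0 : Int) ++ a).take (m + 1)
          = (List.replicate i.toNat (0 : Int) ++ a).take m ++ [a[m - i.toNat]] := by
        rw [List.take_add_one]
        have hmm : m < (List.replicate i.toNat (0 : Int) ++ a).length := by simp; omega
        rw [List.getElem?_eq_getElem hmm]
        congr 1
        rw [List.getElem_append_right (by simp; omega)]
        simp
      rw [htake, hgd, List.getD_eq_getElem?_getD, List.getElem?_eq_getElem hmi]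
      simp
    · rw [if_neg hcase]
      have him : m < i.toNat := by omega
      have htake : (List.replicate i.toNat (0 : Int) ++ a).take (m + 1)
          = (List.replicate i.toNat (0 : Int) ++ a).take m ++ [(0 : Int)] := by
        rw [List.take_add_one]
        have hmm : m < (List.replicate i.toNat (0 : Int) ++ a).length := by simp; omega
        rw [List.getElem?_eq_getElem hmm]
        congr 1
        rw [List.getElem_append_left (by simp; omega)]
        simp
      have hrep : List.replicate (a.length - m) (0 : Int)
          = (0 : Int) :: List.replicate (a.length - (m + 1)) (0 : Int) := by
        have : a.length - m = (a.length - (m + 1)) + 1 := by omega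
        rw [this, List.replicate_succ]
      rw [htake, hrep]
      simp

-- A's inner loop computes pvShift
theorem pvA_inner (a : List Int) (i : Int) (hi : 0 ≤ i) :
    (PySem.List.pyRange 0 (a.length : Int) 1).foldl
      (fun arr j =>
        if j ≥ i then arr.set j.toNat (PySem.List.pyGetD a (j - i) 0) else arr)
      (List.replicate a.length (0 : Int)) = pvShift a i.toNat := by
  rw [PySem.List.pyRange_one]
  have h1 : ((a.length : Int) - 0).toNat = a.length := by omega
  rw [h1, List.foldl_map]
  simp only [zero_add]
  rw [pvA_inner_gen a i hi a.length (le_refl _)]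
  simp [pvShift]

-- one incremental step of B advances the shift by one
theorem pvB_step (a : List Int) (i : Nat) :
    ((0 : Int) :: pvShift a i).take a.length = pvShift a (i + 1) := by
  unfold pvShift
  rw [← List.take_succ_cons]
  have : ((0 : Int) :: (List.replicate i (0 : Int) ++ a)) = List.replicate (i + 1) (0 : Int) ++ a := by
    simp [List.replicate_succ]
  rw [this, List.take_take]
  congr 1
  omega

-- B's loop after m steps: the list of shifts 9..9+m, with shift 9+m as the accumulator
theorem pvB_gen (a : List Int) (m : Nat) :
    (List.range m).foldl
      (fun (p : List (List Int) × List Int) _ =>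
        (p.1 ++ [((0 : Int) :: p.2).take a.length], ((0 : Int) :: p.2).take a.length))
      ([pvShift a 9], pvShift a 9)
    = ((List.range (m + 1)).map (fun k => pvShift a (9 + k)), pvShift a (9 + m)) := by
  induction m with
  | zero => simp
  | succ m ih =>
    rw [List.range_succ, List.foldl_append, ih]
    simp only [List.foldl_cons, List.foldl_nil]
    rw [pvB_step]
    rw [List.range_succ (n := m + 1), List.map_append]
    rfl

-- ===== VERDICT (by name: the statement is the Claim_ definition above) =====
theorem shiftedArrays_spec : Claim_equal_shiftedArrays := by
  intro a _
  unfold Spec_shiftedArrays shiftedArrays shiftedArrays_alt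
  have hrange : PySem.List.pyRange 9 17 1 = [9, 10, 11, 12, 13, 14, 15, 16] := by decide
  rw [hrange]
  simp only [List.foldl_cons, List.foldl_nil, List.nil_append]
  have hfirst : (List.replicate 9 (0 : Int) ++ a).take a.length = pvShift a 9 := rfl
  rw [hfirst]
  have hB := pvB_gen a 7
  simp only [List.range_succ] at hB ⊢
  rw [hB]
  have h9 := pvA_inner a 9 (by omega)
  have h10 := pvA_inner a 10 (by omega)
  have h11 := pvA_inner a 11 (by omega)
  have h12 := pvA_inner a 12 (by omega)
  have h13 := pvA_inner a 13 (by omega)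
  have h14 := pvA_inner a 14 (by omega)
  have h15 := pvA_inner a 15 (by omega)
  have h16 := pvA_inner a 16 (by omega)
  norm_num at h9 h10 h11 h12 h13 h14 h15 h16
  simp [h9, h10, h11, h12, h13, h14, h15, h16]
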